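-- pv_equiv track=rewrite | github.com/wut19/DOVE | utils/generate_qa.py | get_sample_comparison
-- ===== SOURCE A (Python) =====
-- def get_sample_comparison(sample1, sample2, properties):
--     """ Given a sample, compare another sample with it. Get the comparison results """
--     comparison = "I think "
--     all_same = True
--     same_properties = []
--     different_properties = []
--     for i in range(len(properties)):
--         if sample1[properties[i]] == sample2[properties[i]]:
--             same_properties.append(properties[i])
--         else:
--             all_same = False
--             different_properties.append(properties[i])
--     if all_same:
--         comparison += "they are the same object, because all of their tactile properties are the same."
--     else:
--         if len(same_properties) == 0:
--             comparison += "they are different objects, because "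
--         else:
--             comparison += "they are different objects, because while "
--             for i in range(len(same_properties)):
--                 if i == len(same_properties) - 1:
--                     if len(same_properties) > 1:
--                         comparison += f"and {same_properties[i]}s "
--                     else:
--                         comparison += f"{same_properties[i]}s "
--                 else:
--                     comparison += f"{same_properties[i]}s, "
--             comparison += "are the same, "
--         for i in range(len(different_properties)):
--             if i == len(different_properties) - 1:
--                 if len(different_properties) > 1:
--                         comparison += f"and {different_properties[i]}s "
--                 else:
--                     comparison += f"{different_properties[i]}s "
--             else:
--                 comparison += f"{different_properties[i]}s, "
--         comparison += "are different."
--     return comparison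
-- ===== SOURCE B (Python) =====
-- def _attach(p, acc, cnt):
--     """Prepend property p to an already-built group text of cnt elements.
--     The first (i.e. rightmost) element is rendered 'ps '; when a second element
--     arrives the existing last element gets its 'and ' prefix; further elements
--     just prepend 'ps, '."""
--     if cnt == 0:
--         return p + "s ", 1
--     if cnt == 1:
--         return p + "s, and " + acc, 2
--     return p + "s, " + acc, cnt + 1
--
--
-- def get_sample_comparison(sample1, sample2, properties):
--     """ Given a sample, compare another sample with it. Get the comparison results """
--     s, sc, d, dc = "", 0, "", 0
--     for p in reversed(properties):
--         if sample1[p] == sample2[p]: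
--             s, sc = _attach(p, s, sc)
--         else:
--             d, dc = _attach(p, d, dc)
--     if dc == 0:
--         return "I think they are the same object, because all of their tactile properties are the same."
--     out = "I think they are different objects, because "
--     if sc:
--         out += "while " + s + "are the same, "
--     return out + d + "are different."
-- ===== Notes on version B (the rewrite author's own statement) =====
-- stated objective: alternative
-- what changed: Replaces A's forward partition into same/different lists followed by two index-based joining loops with a single reverse pass that keeps no lists at all: each group's sentence fragment is built back-to-front in one string accumulator plus a count, the count deciding whether a new element is the last ('ps '), the second from the right (prepend 'ps, and '+acc, attaching the Oxford 'and'), or earlier ('ps, '+acc).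
import Mathlib
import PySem

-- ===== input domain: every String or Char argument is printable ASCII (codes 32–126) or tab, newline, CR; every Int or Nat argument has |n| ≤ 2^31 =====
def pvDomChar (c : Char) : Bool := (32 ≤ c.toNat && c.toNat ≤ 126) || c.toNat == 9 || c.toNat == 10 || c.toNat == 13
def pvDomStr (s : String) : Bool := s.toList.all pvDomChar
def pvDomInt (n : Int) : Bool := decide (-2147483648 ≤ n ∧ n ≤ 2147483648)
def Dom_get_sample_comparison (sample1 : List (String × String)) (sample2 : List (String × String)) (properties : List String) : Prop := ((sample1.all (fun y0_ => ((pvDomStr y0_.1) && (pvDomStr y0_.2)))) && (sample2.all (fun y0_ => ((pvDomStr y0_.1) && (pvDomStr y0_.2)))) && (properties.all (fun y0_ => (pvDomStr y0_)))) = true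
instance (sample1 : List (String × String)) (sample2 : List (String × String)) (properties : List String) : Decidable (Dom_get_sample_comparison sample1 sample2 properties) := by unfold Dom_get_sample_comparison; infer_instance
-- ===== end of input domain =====

-- B replaces A's partition-lists-then-join loops with a single reverse pass keeping only
-- a string accumulator and a count per group (objective: alternative; same O(n) cost).


-- ===== PORT A =====
-- A's second and third loop: 'for i in range(len(xs)): if i == len-1: … else …', reading xs[i]
-- in order; ported as recursion over the list carrying the running index i and the length.
def get_sample_comparison_join (len : Nat) : Nat → List String → String
  | _, [] => ""
  | i, p :: rest =>
      (if i = len - 1 then (if 1 < len then "and " ++ p ++ "s " else p ++ "s ")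
       else p ++ "s, ") ++ get_sample_comparison_join len (i + 1) rest

def get_sample_comparison (sample1 : List (String × String)) (sample2 : List (String × String)) (properties : List String) : String :=
  -- first loop: build all_same, same_properties, different_properties (appends at the back)
  let st := properties.foldl
    (fun (st : Bool × List String × List String) p =>
      if (PySem.Dict.mk sample1).get? p == (PySem.Dict.mk sample2).get? p
      then (st.1, st.2.1 ++ [p], st.2.2)
      else (false, st.2.1, st.2.2 ++ [p]))
    (true, [], [])
  let same_properties := st.2.1
  let different_properties := st.2.2
  if st.1 then
    "I think " ++ "they are the same object, because all of their tactile properties are the same."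
  else
    (if same_properties.length = 0 then
      "I think " ++ "they are different objects, because "
     else
      ("I think " ++ "they are different objects, because while ")
        ++ get_sample_comparison_join same_properties.length 0 same_properties
        ++ "are the same, ")
      ++ get_sample_comparison_join different_properties.length 0 different_properties
      ++ "are different."

-- ===== PORT B =====
-- B's _attach: prepend a property to a group fragment built back-to-front; the count says
-- whether this element is the rightmost, the second from the right (attach the 'and '), or earlier.
def get_sample_comparison_attach (p : String) (acc : String × Nat) : String × Nat :=
  if acc.2 = 0 then (p ++ "s ", 1)
  else if acc.2 = 1 then (p ++ "s, and " ++ acc.1, 2)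
  else (p ++ "s, " ++ acc.1, acc.2 + 1)

def get_sample_comparison_alt (sample1 : List (String × String)) (sample2 : List (String × String)) (properties : List String) : String :=
  -- B's single loop over reversed(properties), state ((s, sc), (d, dc))
  let st := (properties.reverse).foldl
    (fun (st : (String × Nat) × (String × Nat)) p =>
      if (PySem.Dict.mk sample1).get? p == (PySem.Dict.mk sample2).get? p
      then (get_sample_comparison_attach p st.1, st.2)
      else (st.1, get_sample_comparison_attach p st.2))
    (("", 0), ("", 0))
  if st.2.2 = 0 then
    "I think they are the same object, because all of their tactile properties are the same."
  else
    (if st.1.2 ≠ 0 then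
      "I think they are different objects, because " ++ ("while " ++ st.1.1 ++ "are the same, ")
     else "I think they are different objects, because ")
      ++ st.2.1 ++ "are different."

-- ===== PRECONDITION & SPEC =====
-- Pre_ excludes exactly the inputs on which Python A raises KeyError: some property missing
-- from sample1 or sample2 (the dicts, as association lists, lack that key).
def Pre_get_sample_comparison (sample1 : List (String × String)) (sample2 : List (String × String)) (properties : List String) : Prop :=
  ∀ p ∈ properties,
    ((PySem.Dict.mk sample1).get? p).isSome = true ∧ ((PySem.Dict.mk sample2).get? p).isSome = true
instance (sample1 : List (String × String)) (sample2 : List (String × String)) (properties : List String) : Decidable (Pre_get_sample_comparison sample1 sample2 properties) := by unfold Pre_get_sample_comparison; infer_instance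

def pvWitness_get_sample_comparison : (List (String × String)) × (List (String × String)) × List String :=
  ([("hardness", "hard"), ("color", "red")], [("hardness", "hard"), ("color", "blue")], ["hardness", "color"])

def Spec_get_sample_comparison (sample1 : List (String × String)) (sample2 : List (String × String)) (properties : List String) (out : String) : Prop := out = get_sample_comparison_alt sample1 sample2 properties
instance (sample1 : List (String × String)) (sample2 : List (String × String)) (properties : List String) (out : String) : Decidable (Spec_get_sample_comparison sample1 sample2 properties out) := by unfold Spec_get_sample_comparison; infer_instance

-- ===== CLAIM (what is proved, stated in full; the proofs are below) =====
def Claim_equal_get_sample_comparison : Prop := ∀ (sample1 : List (String × String)) (sample2 : List (String × String)) (properties : List String), Dom_get_sample_comparison sample1 sample2 properties → Pre_get_sample_comparison sample1 sample2 properties → Spec_get_sample_comparison sample1 sample2 properties (get_sample_comparison sample1 sample2 properties)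

-- ===== LEMMAS AND PROOFS =====

-- proof-side description of a joined group: every element 'ps, ' except the last,
-- which is 'and ps ' when the group has ≥ 2 elements, else 'ps '
def gscFmtGo : List String → String
  | [] => ""
  | [p] => "and " ++ p ++ "s "
  | p :: rest => p ++ "s, " ++ gscFmtGo rest

def gscFmt (props : List String) : String :=
  match props with
  | [p] => p ++ "s "
  | props => gscFmtGo props

-- A's first loop computes (all_same, filter t, filter !t)
theorem gsc_scan (t : String → Bool) (props : List String) : ∀ (b : Bool) (s d : List String),
    props.foldl
      (fun (st : Bool × List String × List String) p =>
        if t p then (st.1, st.2.1 ++ [p], st.2.2) else (false, st.2.1, st.2.2 ++ [p]))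
      (b, s, d)
    = (b && props.all t, s ++ props.filter t, d ++ props.filter (fun p => !t p)) := by
  induction props with
  | nil => intro b s d; simp
  | cons p rest ih =>
    intro b s d
    by_cases h : t p = true <;> simp [h, ih]

-- one unfolding step of A's joining loop
theorem gsc_join_cons (len i : Nat) (p : String) (rest : List String) :
    get_sample_comparison_join len i (p :: rest)
      = (if i = len - 1 then (if 1 < len then "and " ++ p ++ "s " else p ++ "s ")
         else p ++ "s, ") ++ get_sample_comparison_join len (i + 1) rest := rfl

-- A's joining loop equals gscFmtGo when the whole list has length ≥ 2
theorem gsc_join_go (xs : List String) : ∀ i : Nat, xs ≠ [] → 1 < i + xs.length →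
    get_sample_comparison_join (i + xs.length) i xs = gscFmtGo xs := by
  induction xs with
  | nil => simp
  | cons p rest ih =>
    intro i _ hlen
    cases rest with
    | nil =>
      rw [gsc_join_cons, if_pos (by simp), if_pos hlen]
      simp [get_sample_comparison_join, gscFmtGo]
    | cons q rs =>
      rw [gsc_join_cons, if_neg (by simp only [List.length_cons]; omega)]
      have h1 : i + (p :: q :: rs).length = (i + 1) + (q :: rs).length := by
        simp only [List.length_cons]; omega
      rw [h1, ih (i + 1) (by simp) (by simp only [List.length_cons]; omega)]
      simp [gscFmtGo, String.append_assoc]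

-- A's joining loop (index 0, len = length) equals gscFmt on nonempty lists
theorem gsc_join_eq_fmt (xs : List String) (h : xs ≠ []) :
    get_sample_comparison_join xs.length 0 xs = gscFmt xs := by
  match xs with
  | [p] => simp [get_sample_comparison_join, gscFmt]
  | p :: q :: rs =>
    have := gsc_join_go (p :: q :: rs) 0 (by simp) (by simp)
    simpa [gscFmt] using this

-- all t ↔ the "different" filter is empty
theorem gsc_all_iff (t : String → Bool) (props : List String) :
    props.all t = (props.filter (fun p => !t p)).isEmpty := by
  induction props with
  | nil => simp
  | cons p rest ih => by_cases h : t p = true <;> simp [h, ih]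

-- B's combined fold splits into one attach-fold per filtered group
theorem gsc_split (t : String → Bool) (props : List String) (a b : String × Nat) :
    props.foldr
      (fun p (st : (String × Nat) × (String × Nat)) =>
        if t p then (get_sample_comparison_attach p st.1, st.2)
        else (st.1, get_sample_comparison_attach p st.2))
      (a, b)
    = ((props.filter t).foldr get_sample_comparison_attach a,
       (props.filter (fun p => !t p)).foldr get_sample_comparison_attach b) := by
  induction props with
  | nil => simp
  | cons p rest ih => by_cases h : t p = true <;> simp [h, ih]

-- the attach-fold over a group yields exactly the joined fragment and the group's length
theorem gsc_attach_fold (xs : List String) :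
    xs.foldr get_sample_comparison_attach ("", 0)
      = ((if xs.isEmpty then "" else gscFmt xs), xs.length) := by
  induction xs with
  | nil => simp
  | cons p rest ih =>
    cases rest with
    | nil => simp [get_sample_comparison_attach, gscFmt]
    | cons q rs =>
      cases rs with
      | nil =>
        simp [List.foldr, get_sample_comparison_attach, gscFmt, gscFmtGo,
          String.append_assoc]
        rw [show ("s, and " : String) = "s, " ++ "and " from by decide, String.append_assoc]
      | cons r rs' =>
        rw [List.foldr_cons, ih]
        simp only [List.isEmpty_cons, List.length_cons]
        simp [get_sample_comparison_attach, gscFmt, gscFmtGo, String.append_assoc]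

-- moving the literal 'while ' across the merged string literal, with an opaque tail
theorem gsc_while_shift (X : String) :
    "I think " ++ ("they are different objects, because while " ++ X)
      = "I think they are different objects, because " ++ ("while " ++ X) := by
  rw [← String.append_assoc, ← String.append_assoc]
  congr 1

-- ===== VERDICT (by name: the statement is the Claim_ definition above) =====
theorem get_sample_comparison_spec : Claim_equal_get_sample_comparison := by
  intro sample1 sample2 properties _dom _pre
  unfold Spec_get_sample_comparison get_sample_comparison get_sample_comparison_alt
  rw [gsc_scan, List.foldl_reverse]
  have hsplit := gsc_split
    (fun p => (PySem.Dict.mk sample1).get? p == (PySem.Dict.mk sample2).get? p)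
    properties ("", 0) ("", 0)
  simp only [Bool.true_and, List.nil_append]
  rw [hsplit, gsc_attach_fold, gsc_attach_fold]
  rw [gsc_all_iff]
  set sameL := properties.filter
    (fun p => (PySem.Dict.mk sample1).get? p == (PySem.Dict.mk sample2).get? p) with hs
  set diffL := properties.filter
    (fun p => !((PySem.Dict.mk sample1).get? p == (PySem.Dict.mk sample2).get? p)) with hd
  by_cases hdiff : diffL.isEmpty = true
  · rw [if_pos hdiff]
    have : diffL.length = 0 := by simpa [List.isEmpty_iff, List.length_eq_zero_iff] using hdiff
    rw [if_pos this]
    decide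
  · rw [if_neg hdiff]
    have hdne : diffL ≠ [] := by simpa [List.isEmpty_iff] using hdiff
    have hdlen : ¬ diffL.length = 0 := by simpa [List.length_eq_zero_iff] using hdne
    rw [if_neg hdlen, if_neg (by simpa [List.isEmpty_iff] using hdne : ¬ diffL.isEmpty = true)]
    rw [gsc_join_eq_fmt _ hdne]
    by_cases hsame : sameL.isEmpty = true
    · have hlen : sameL.length = 0 := by
        simpa [List.isEmpty_iff, List.length_eq_zero_iff] using hsame
      rw [if_pos hlen, if_neg (by simp [hlen])]
      have hl : "I think " ++ "they are different objects, because "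
          = "I think they are different objects, because " := by decide
      rw [hl]
    · have hsne : sameL ≠ [] := by simpa [List.isEmpty_iff] using hsame
      have hlen : ¬ sameL.length = 0 := by simpa [List.length_eq_zero_iff] using hsne
      rw [if_neg hlen, if_pos (by simpa using hlen),
        if_neg (by simpa [List.isEmpty_iff] using hsne : ¬ sameL.isEmpty = true),
        gsc_join_eq_fmt _ hsne]
      simp only [String.append_assoc]
      exact gsc_while_shift _
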